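-- pv_equiv track=rewrite | github.com/collinsakuma/LeetCode | Problems/1464. Maximum Product of Two Elements in an Array/max_product_of_two_elements.py | maxProductTWo
-- ===== SOURCE A (Python) =====
-- def maxProductTWo(nums):
--     # set two points
--     first, second = 0, 0
--
--     for num in nums: # loop through nums
--         if num >= first: # check if num is greater than or equal to first, if num is greater set new first and second variables
--             second, first = first, num
--         elif num >= second: # if num is not greater than first check if it is greater than second, if greater set new second value
--             second = num
--
--     return (first - 1) * (second - 1)
-- ===== SOURCE B (Python) =====
-- def maxProductTWo(nums):
--     # sort-then-index instead of a single scan tracking two running maxima;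
--     # the two sentinel zeros reproduce A's (0, 0) initialisation
--     s = sorted(list(nums) + [0, 0], reverse=True)
--     return (s[0] - 1) * (s[1] - 1)
-- ===== Notes on version B (the rewrite author's own statement) =====
-- stated objective: alternative
-- what changed: Replaces the single-pass tracking of two running maxima by sorting nums plus two zero sentinels in descending order and reading the top two elements off by index.
import Mathlib
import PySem

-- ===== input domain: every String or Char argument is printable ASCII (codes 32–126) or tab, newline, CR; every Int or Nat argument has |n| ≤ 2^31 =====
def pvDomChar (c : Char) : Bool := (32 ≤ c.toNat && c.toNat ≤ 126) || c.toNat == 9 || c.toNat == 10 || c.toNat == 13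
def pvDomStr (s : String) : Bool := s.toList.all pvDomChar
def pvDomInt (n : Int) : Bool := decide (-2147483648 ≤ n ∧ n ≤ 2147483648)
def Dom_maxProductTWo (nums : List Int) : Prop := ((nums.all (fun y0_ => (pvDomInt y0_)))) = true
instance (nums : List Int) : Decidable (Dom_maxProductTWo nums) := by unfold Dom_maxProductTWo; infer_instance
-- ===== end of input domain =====

-- B replaces A's one-pass two-maxima scan by sort-descending-then-index (objective: alternative; not faster).

-- ===== PORT A =====
-- loop body of A: update the pair (first, second) with num
def pvStep (p : Int × Int) (num : Int) : Int × Int :=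
  if num ≥ p.1 then (num, p.1) else if num ≥ p.2 then (p.1, num) else p

def maxProductTWo (nums : List Int) : Int :=
  let fs := nums.foldl pvStep (0, 0)
  (fs.1 - 1) * (fs.2 - 1)

-- ===== PORT B =====
def maxProductTWo_alt (nums : List Int) : Int :=
  let s := PySem.List.sorted (nums ++ [0, 0]) (fun x => x) true
  -- s[0], s[1]: always in range since s has length ≥ 2; the getD default is never used
  (PySem.List.pyGetD s 0 0 - 1) * (PySem.List.pyGetD s 1 0 - 1)

-- ===== PRECONDITION & SPEC =====
def Spec_maxProductTWo (nums : List Int) (out : Int) : Prop := out = maxProductTWo_alt nums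
instance (nums : List Int) (out : Int) : Decidable (Spec_maxProductTWo nums out) := by unfold Spec_maxProductTWo; infer_instance

-- ===== CLAIM (what is proved, stated in full; the proofs are below) =====
def Claim_equal_maxProductTWo : Prop := ∀ (nums : List Int), Dom_maxProductTWo nums → Spec_maxProductTWo nums (maxProductTWo nums)

-- ===== LEMMAS AND PROOFS =====

theorem pvStep_comm (p : Int × Int) (x y : Int) :
    pvStep (pvStep p x) y = pvStep (pvStep p y) x := by
  obtain ⟨f, s⟩ := p
  simp only [pvStep]
  split_ifs <;> simp_all <;> omega

-- the fold over pvStep is permutation-invariant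
theorem foldl_pvStep_perm {l₁ l₂ : List Int} (h : l₁.Perm l₂) (p : Int × Int) :
    l₁.foldl pvStep p = l₂.foldl pvStep p := by
  haveI : RightCommutative pvStep := ⟨fun p x y => pvStep_comm p x y⟩
  exact h.foldl_eq p

-- elements no larger than the current second maximum leave the pair unchanged
theorem foldl_pvStep_small (rest : List Int) (a b : Int) (hba : b ≤ a)
    (h : ∀ x ∈ rest, x ≤ b) : rest.foldl pvStep (a, b) = (a, b) := by
  induction rest with
  | nil => rfl
  | cons x xs ih =>
    have hx : x ≤ b := h x (by simp)
    have hstep : pvStep (a, b) x = (a, b) := by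
      simp only [pvStep]
      split_ifs <;> simp_all <;> omega
    simp only [List.foldl_cons, hstep]
    exact ih (fun y hy => h y (by simp [hy]))

-- folding pvStep from (0,0) over a descending list whose second element is ≥ 0 yields its top two
theorem foldl_pvStep_sorted (a b : Int) (rest : List Int) (hb : 0 ≤ b)
    (hp : List.Pairwise (fun x y => y ≤ x) (a :: b :: rest)) :
    (a :: b :: rest).foldl pvStep (0, 0) = (a, b) := by
  have hba : b ≤ a := (List.pairwise_cons.mp hp).1 b (by simp)
  have hrest : ∀ x ∈ rest, x ≤ b :=
    (List.pairwise_cons.mp (List.pairwise_cons.mp hp).2).1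
  have h1 : pvStep (0, 0) a = (a, 0) := by
    simp only [pvStep]; split_ifs <;> simp_all <;> omega
  have h2 : pvStep (a, 0) b = (a, b) := by
    simp only [pvStep]
    split_ifs <;> simp_all <;> omega
  simp only [List.foldl_cons, h1, h2]
  exact foldl_pvStep_small rest a b hba hrest

-- ===== VERDICT (by name: the statement is the Claim_ definition above) =====
theorem maxProductTWo_spec : Claim_equal_maxProductTWo := by
  intro nums _
  unfold Spec_maxProductTWo maxProductTWo maxProductTWo_alt
  set t := PySem.List.sorted (nums ++ [0, 0]) (fun x => x) true with ht
  have hperm : t.Perm (nums ++ [0, 0]) := PySem.List.sorted_perm _ _ _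
  have hpw : List.Pairwise (fun x y => y ≤ x) t := PySem.List.sorted_pairwise_rev _ _
  have hlen : t.length = nums.length + 2 := by
    rw [ht, PySem.List.length_sorted]; simp
  obtain ⟨a, b, rest, hts⟩ : ∃ a b rest, t = a :: b :: rest := by
    match t, hlen with
    | a :: b :: rest, _ => exact ⟨a, b, rest, rfl⟩
  -- t contains the two sentinel zeros, so its second element is ≥ 0
  have hcount : 2 ≤ t.count 0 := by
    rw [hperm.count_eq]
    simp only [List.count_append]
    have : ([0, 0] : List Int).count 0 = 2 := by decide
    omega
  have hb : 0 ≤ b := by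
    by_contra hneg
    rw [Int.not_le] at hneg
    rw [hts] at hpw hcount
    have hrest : ∀ x ∈ rest, x ≤ b :=
      (List.pairwise_cons.mp (List.pairwise_cons.mp hpw).2).1
    have hr0 : rest.count 0 = 0 := by
      rw [List.count_eq_zero]
      intro h0
      have := hrest 0 h0; omega
    have hbne : b ≠ 0 := by omega
    simp [List.count_cons, hr0, hbne] at hcount
    split_ifs at hcount <;> omega
  -- A's fold equals the fold over the sorted list (two leading zeros are absorbed by the init)
  have hA : nums.foldl pvStep (0, 0) = t.foldl pvStep (0, 0) := by
    have h00 : pvStep (pvStep (0, 0) 0) 0 = (0, 0) := by decide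
    have hperm' : (0 :: 0 :: nums).Perm t := by
      exact ((List.perm_append_comm (l₁ := ([0, 0] : List Int)) (l₂ := nums)).trans hperm.symm)
    calc nums.foldl pvStep (0, 0)
        = (0 :: 0 :: nums).foldl pvStep (0, 0) := by simp [List.foldl_cons, h00]
      _ = t.foldl pvStep (0, 0) := foldl_pvStep_perm hperm' _
  rw [hts] at hpw ⊢
  rw [hA, hts, foldl_pvStep_sorted a b rest hb hpw]
  simp [pysem]
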